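-- pv_equiv track=rewrite | github.com/felipeoriani/euler | 036.py | f
-- ===== SOURCE A (Python) =====
-- def to_binary(n):
--     return "{0:b}".format(n)
--
-- def is_palindrome(n):
--     return str(n) == str(n)[::-1]
--
-- def f(m):
--     s = 0
--     for i in range(1, m):
--         if is_palindrome(i):
--             b = to_binary(i)
--             if is_palindrome(b):
--                 s += i
--     return s
-- ===== SOURCE B (Python) =====
-- def rev_base(n, b):
--     r = 0
--     while n:
--         r = r * b + n % b
--         n //= b
--     return r
--
-- def f(m):
--     s = 0
--     for i in range(1, m, 2):
--         if rev_base(i, 2) == i and rev_base(i, 10) == i: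
--             s += i
--     return s
-- ===== Notes on version B (the rewrite author's own statement) =====
-- stated objective: alternative
-- what changed: B drops all string formatting: it tests decimal and binary palindromicity by arithmetic digit reversal (a while-loop building the reversed number) and iterates only over odd numbers, since a positive binary palindrome must be odd.
import Mathlib
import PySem

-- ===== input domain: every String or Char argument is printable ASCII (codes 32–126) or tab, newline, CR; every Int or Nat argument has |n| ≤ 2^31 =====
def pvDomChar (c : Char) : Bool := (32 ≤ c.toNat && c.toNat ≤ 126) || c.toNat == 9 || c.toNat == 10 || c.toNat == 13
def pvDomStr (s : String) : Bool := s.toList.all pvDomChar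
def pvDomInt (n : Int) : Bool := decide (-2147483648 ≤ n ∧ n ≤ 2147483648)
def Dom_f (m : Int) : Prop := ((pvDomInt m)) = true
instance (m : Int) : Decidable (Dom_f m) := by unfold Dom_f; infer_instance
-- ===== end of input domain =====

-- B replaces A's string-based palindrome tests by arithmetic digit reversal and iterates
-- only over odd numbers (a positive binary palindrome is odd): an alternative, string-free algorithm.

-- ===== PORT A =====
-- is_palindrome(n) is called with an int and with a str in A; two monomorphic helpers
-- (str(n) on a str is the identity, so the str version drops the conversion).
def pvIsPalInt (n : Int) : Bool :=
  match PySem.Str.slice? (PySem.Int.toStr n) none none (-1) with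
  | some r => PySem.Int.toStr n == r
  | none => false            -- unreachable: step -1 ≠ 0 never raises

def pvIsPalStr (s : String) : Bool :=
  match PySem.Str.slice? s none none (-1) with
  | some r => s == r
  | none => false            -- unreachable: step -1 ≠ 0 never raises

-- to_binary(n) = "{0:b}".format(n)
def pvToBinary (n : Int) : String := PySem.Int.toBin n

def f (m : Int) : Int :=
  (PySem.List.pyRange 1 m 1).foldl
    (fun s i =>
      if pvIsPalInt i then
        (if pvIsPalStr (pvToBinary i) then s + i else s)
      else s) 0

-- ===== PORT B =====
-- fdiv on nonnegative arguments is Nat division (used by pvRevGo's decreasing_by)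
theorem pvFdivToNat (n b : ℤ) (h : 0 ≤ n) (hb : 0 < b) : n.fdiv b = ((n.toNat / b.toNat : ℕ) : ℤ) := by
  rw [Int.natCast_ediv, Int.toNat_of_nonneg h, Int.toNat_of_nonneg (by omega), Int.fdiv_eq_ediv]
  simp; omega

-- rev_base(n, b): the while loop; the guard (0 < n ∧ 2 ≤ b) makes the recursion total —
-- f_alt only calls it with n ≥ 1 and b ∈ {2, 10}, where Python's `while n:` behaves identically.
def pvRevGo (n b r : Int) : Int :=
  if h : 0 < n ∧ 2 ≤ b then pvRevGo (PySem.Int.floordiv n b) b (r * b + PySem.Int.mod n b) else r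
termination_by n.toNat
decreasing_by
  obtain ⟨h1, h2⟩ := h
  rw [PySem.Int.floordiv, pvFdivToNat n b (by omega) (by omega)]
  simp only [Int.toNat_natCast]
  have := Nat.div_lt_self (n := n.toNat) (k := b.toNat) (by omega) (by omega)
  omega

def pvRevBase (n b : Int) : Int := pvRevGo n b 0

def f_alt (m : Int) : Int :=
  (PySem.List.pyRange 1 m 2).foldl
    (fun s i => if pvRevBase i 2 = i ∧ pvRevBase i 10 = i then s + i else s) 0

-- ===== PRECONDITION & SPEC =====
def Spec_f (m : Int) (out : Int) : Prop := out = f_alt m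
instance (m : Int) (out : Int) : Decidable (Spec_f m out) := by unfold Spec_f; infer_instance

-- ===== CLAIM (what is proved, stated in full; the proofs are below) =====
def Claim_equal_f : Prop := ∀ (m : Int), Dom_f m → Spec_f m (f m)

-- ===== LEMMAS AND PROOFS =====

theorem pvFmodToNat (n b : ℤ) (h : 0 ≤ n) (hb : 0 < b) : n.fmod b = ((n.toNat % b.toNat : ℕ) : ℤ) := by
  rw [Int.natCast_emod, Int.toNat_of_nonneg h, Int.toNat_of_nonneg (by omega), Int.fmod_eq_emod]
  simp; omega

-- ---- Nat.toDigits is the reversed digit list rendered with digitChar ----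
theorem pvToDigitsCore_spec (b : ℕ) (hb : 1 < b) :
    ∀ fuel n ds, 0 < n → n < fuel →
      Nat.toDigitsCore b fuel n ds = ((Nat.digits b n).map Nat.digitChar).reverse ++ ds := by
  intro fuel
  induction fuel with
  | zero => intro n ds h1 h2; omega
  | succ fuel ih =>
    intro n ds h1 h2
    rw [Nat.toDigitsCore]
    by_cases h : n / b = 0
    · have hnb : n < b := by
        rcases (Nat.div_eq_zero_iff).mp h with h' | h' <;> omega
      rw [if_pos h, Nat.digits_def' hb h1, h, Nat.digits_zero]
      simp
    · have h3 : 0 < n / b := Nat.pos_of_ne_zero h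
      have h4 : n / b < fuel := lt_of_lt_of_le (Nat.div_lt_self h1 (by omega)) (by omega)
      rw [if_neg h, ih _ _ h3 h4, Nat.digits_def' hb h1]
      simp

theorem pvToDigits_eq (b n : ℕ) (hb : 1 < b) (hn : 0 < n) :
    Nat.toDigits b n = ((Nat.digits b n).map Nat.digitChar).reverse := by
  have := pvToDigitsCore_spec b hb (n+1) n [] hn (by omega)
  simpa [Nat.toDigits] using this

-- ---- the reversal loop computes ofDigits of the reversed digit list ----
theorem pvRevGo_spec (b : ℕ) (hb : 2 ≤ b) :
    ∀ (nN : ℕ) (r : Int),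
      pvRevGo (nN : Int) (b : Int) r
        = (Nat.ofDigits b (Nat.digits b nN).reverse : ℕ) + r * ((b ^ (Nat.digits b nN).length : ℕ) : ℤ) := by
  intro nN
  induction nN using Nat.strong_induction_on with
  | _ nN ih =>
    intro r
    rw [pvRevGo]
    by_cases h : 0 < nN
    · rw [dif_pos ⟨by exact_mod_cast h, by exact_mod_cast hb⟩]
      have hfd : PySem.Int.floordiv (nN : Int) b = ((nN / b : ℕ) : Int) := by
        rw [PySem.Int.floordiv, pvFdivToNat _ _ (by positivity) (by positivity)]; simp
      have hmd : PySem.Int.mod (nN : Int) b = ((nN % b : ℕ) : Int) := by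
        rw [PySem.Int.mod, pvFmodToNat _ _ (by positivity) (by positivity)]; simp
      rw [hfd, hmd, ih (nN / b) (Nat.div_lt_self h (by omega))]
      rw [Nat.digits_def' (by omega : 1 < b) h]
      rw [List.reverse_cons, Nat.ofDigits_append, Nat.ofDigits_singleton]
      push_cast
      simp only [List.length_reverse, List.length_cons, pow_succ]
      ring
    · have h0 : nN = 0 := by omega
      subst h0
      rw [dif_neg (by simp)]
      simp

-- ---- reversed-digits number equals n iff the digit list is a palindrome ----
theorem pvPalIff (b n : ℕ) (hb : 1 < b) (hn : 0 < n) :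
    Nat.ofDigits b (Nat.digits b n).reverse = n ↔ (Nat.digits b n).reverse = Nat.digits b n := by
  constructor
  · intro he
    by_cases hd : n % b = 0
    · exfalso
      have hL : Nat.digits b n = n % b :: Nat.digits b (n / b) := Nat.digits_def' hb hn
      rw [hL, hd, List.reverse_cons, Nat.ofDigits_append, Nat.ofDigits_singleton] at he
      have hlt : Nat.ofDigits b (Nat.digits b (n / b)).reverse < b ^ (Nat.digits b (n / b)).length := by
        have := Nat.ofDigits_lt_base_pow_length (b := b) (l := (Nat.digits b (n / b)).reverse) hb
          (fun x hx => Nat.digits_lt_base hb (List.mem_reverse.mp hx))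
        simpa using this
      have hge : b ^ (Nat.digits b (n / b)).length ≤ n := by
        have h1 := Nat.base_pow_length_digits_le b n hb (by omega)
        rw [hL] at h1
        simp only [List.length_cons, pow_succ'] at h1
        exact Nat.le_of_mul_le_mul_left h1 (by omega)
      omega
    · have hne : Nat.digits b n ≠ [] := Nat.digits_ne_nil_iff_ne_zero.mpr (by omega)
      have hnr : (Nat.digits b n).reverse ≠ [] := by simpa using hne
      have hdig : Nat.digits b (Nat.ofDigits b (Nat.digits b n).reverse) = (Nat.digits b n).reverse := by
        apply Nat.digits_ofDigits b hb _ (fun x hx => Nat.digits_lt_base hb (List.mem_reverse.mp hx))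
        intro h
        rw [List.getLast_reverse h]
        have : (Nat.digits b n).head hne = n % b := by
          simp only [Nat.digits_def' hb hn, List.head_cons]
        simpa [this] using hd
      rw [← hdig, he]
  · intro hrev
    rw [hrev, Nat.ofDigits_digits]

-- ---- digitChar is injective below 16 ----
theorem pvDigitCharInj : ∀ x < 16, ∀ y < 16, Nat.digitChar x = Nat.digitChar y → x = y := by decide

theorem pvMapDigitCharInj : ∀ (L M : List ℕ), (∀ x ∈ L, x < 16) → (∀ x ∈ M, x < 16) →
    L.map Nat.digitChar = M.map Nat.digitChar → L = M := by
  intro L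
  induction L with
  | nil => intro M _ _ h; cases M <;> simp_all
  | cons a L ih =>
    intro M hL hM h
    cases M with
    | nil => simp_all
    | cons c M =>
      simp only [List.map_cons, List.cons.injEq] at h
      have := pvDigitCharInj a (hL a (by simp)) c (hM c (by simp)) h.1
      subst this
      simp [ih M (fun x hx => hL x (by simp [hx])) (fun x hx => hM x (by simp [hx])) h.2]

-- ---- char-level palindromy of toDigits = digit-level palindromy ----
theorem pvToDigitsPal (b n : ℕ) (hb : 1 < b) (hb16 : b ≤ 16) (hn : 0 < n) :
    (Nat.toDigits b n = (Nat.toDigits b n).reverse) ↔ (Nat.digits b n).reverse = Nat.digits b n := by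
  rw [pvToDigits_eq b n hb hn, List.reverse_reverse, ← List.map_reverse]
  constructor
  · intro h
    have := pvMapDigitCharInj (Nat.digits b n).reverse (Nat.digits b n)
      (fun x hx => lt_of_lt_of_le (Nat.digits_lt_base hb (List.mem_reverse.mp hx)) hb16)
      (fun x hx => lt_of_lt_of_le (Nat.digits_lt_base hb hx) hb16)
    exact this (by rw [← h, List.map_reverse])
  · intro h
    rw [h]

-- ---- the string palindrome tests, reduced to digit-level palindromy ----
theorem pvIsPalStr_iff (s : String) : pvIsPalStr s = true ↔ s.toList = s.toList.reverse := by
  rw [pvIsPalStr, PySem.Str.slice?_none_none_neg_one]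
  simp only [beq_iff_eq, String.ext_iff, String.toList_ofList]

theorem pvIsPalInt_iff (i : Int) (hi : 1 ≤ i) :
    pvIsPalInt i = true ↔ (Nat.digits 10 i.toNat).reverse = Nat.digits 10 i.toNat := by
  rw [pvIsPalInt, PySem.Str.slice?_none_none_neg_one]
  simp only [beq_iff_eq, String.ext_iff, String.toList_ofList, PySem.Int.toList_toStr]
  rw [PySem.Int.toChars, if_neg (by omega)]
  exact pvToDigitsPal 10 i.toNat (by omega) (by omega) (by omega)

theorem pvIsPalBin_iff (i : Int) (hi : 1 ≤ i) :
    pvIsPalStr (pvToBinary i) = true ↔ (Nat.digits 2 i.toNat).reverse = Nat.digits 2 i.toNat := by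
  rw [pvIsPalStr_iff, pvToBinary, PySem.Int.toList_toBin]
  rw [PySem.Int.toBinChars, if_neg (by omega)]
  exact (pvToDigitsPal 2 i.toNat (by omega) (by omega) (by omega)).symm.symm

-- ---- the arithmetic reversal tests, reduced to digit-level palindromy ----
theorem pvRevBase_iff (b : ℕ) (hb : 2 ≤ b) (i : Int) (hi : 1 ≤ i) :
    pvRevBase i (b : Int) = i ↔ (Nat.digits b i.toNat).reverse = Nat.digits b i.toNat := by
  have hcast : i = ((i.toNat : ℕ) : Int) := by omega
  rw [pvRevBase]
  rw [hcast, pvRevGo_spec b hb i.toNat 0]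
  rw [zero_mul, add_zero]
  rw [Int.natCast_inj]
  exact pvPalIff b i.toNat (by omega) (by omega)

-- ---- a positive even number is never a binary palindrome ----
theorem pvEvenNotBinPal (i : Int) (hi : 1 ≤ i) (he : i % 2 = 0) :
    pvIsPalStr (pvToBinary i) = false := by
  rw [← Bool.not_eq_true, pvIsPalBin_iff i hi]
  intro h
  have hne : Nat.digits 2 i.toNat ≠ [] := Nat.digits_ne_nil_iff_ne_zero.mpr (by omega)
  have hnr : (Nat.digits 2 i.toNat).reverse ≠ [] := by simpa using hne
  have h1 : (Nat.digits 2 i.toNat).getLast hne ≠ 0 := Nat.getLast_digit_ne_zero 2 (by omega)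
  have h2 : (Nat.digits 2 i.toNat).head hne = i.toNat % 2 := by
    simp only [Nat.digits_def' (by omega : 1 < 2) (by omega : 0 < i.toNat), List.head_cons]
  have h3 : (Nat.digits 2 i.toNat).reverse.getLast hnr = (Nat.digits 2 i.toNat).head hne :=
    List.getLast_reverse hnr
  rw [List.getLast_congr hnr hne h] at h3
  rw [h3, h2] at h1
  omega

-- ---- summand functions of the two loops ----
def pvFA (i : Int) : Int := if pvIsPalInt i && pvIsPalStr (pvToBinary i) then i else 0
def pvFB (i : Int) : Int := if pvRevBase i 2 = i ∧ pvRevBase i 10 = i then i else 0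

theorem pvFA_body :
    (fun (s i : Int) => if pvIsPalInt i then (if pvIsPalStr (pvToBinary i) then s + i else s) else s)
      = fun s i => s + pvFA i := by
  funext s i
  rw [pvFA]
  cases hp : pvIsPalInt i <;> cases hq : pvIsPalStr (pvToBinary i) <;> simp

theorem pvFB_body :
    (fun (s i : Int) => if pvRevBase i 2 = i ∧ pvRevBase i 10 = i then s + i else s)
      = fun s i => s + pvFB i := by
  funext s i
  rw [pvFB]
  split_ifs <;> simp

theorem pvFA_eq_FB (i : Int) (hi : 1 ≤ i) : pvFA i = pvFB i := by
  have h10 : pvRevBase i 10 = i ↔ (Nat.digits 10 i.toNat).reverse = Nat.digits 10 i.toNat := by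
    have := pvRevBase_iff 10 (by omega) i hi
    simpa using this
  have h2 : pvRevBase i 2 = i ↔ (Nat.digits 2 i.toNat).reverse = Nat.digits 2 i.toNat := by
    have := pvRevBase_iff 2 (by omega) i hi
    simpa using this
  have hA := pvIsPalInt_iff i hi
  have hB := pvIsPalBin_iff i hi
  rw [pvFA, pvFB]
  cases hp : pvIsPalInt i <;> cases hq : pvIsPalStr (pvToBinary i) <;> simp_all

theorem pvFA_even (i : Int) (hi : 1 ≤ i) (he : i % 2 = 0) : pvFA i = 0 := by
  rw [pvFA, pvEvenNotBinPal i hi he]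
  simp

-- ---- summing over the list, terms vanishing off the filter ----
theorem pvSumFilter (p : Int → Bool) (F : Int → Int) :
    ∀ (l : List Int), (∀ i ∈ l, p i = false → F i = 0) →
      ((l.filter p).map F).sum = (l.map F).sum := by
  intro l
  induction l with
  | nil => intro _; simp
  | cons a l ih =>
    intro h
    by_cases hp : p a = true
    · rw [List.filter_cons, if_pos hp]
      simp only [List.map_cons, List.sum_cons]
      rw [ih (fun i hil => h i (by simp [hil]))]
    · rw [List.filter_cons, if_neg hp]
      simp only [List.map_cons, List.sum_cons]
      rw [ih (fun i hil => h i (by simp [hil])), h a (by simp) (by simpa using hp)]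
      simp

-- ---- the odd elements of range(1, m) are exactly range(1, m, 2) ----
theorem pvRangeOdd : ∀ (n : ℕ),
    ((List.range n).map (fun k : ℕ => (1:ℤ) + 1 * (k:ℤ))).filter (fun i => decide (i % 2 = 1))
      = (List.range ((n+1)/2)).map (fun k : ℕ => (1:ℤ) + 2 * (k:ℤ)) := by
  intro n
  induction n with
  | zero => simp
  | succ n ih =>
    rw [List.range_succ, List.map_append, List.filter_append, ih]
    by_cases hpar : n % 2 = 0
    · have h2 : (n + 1 + 1) / 2 = (n + 1) / 2 + 1 := by omega
      rw [h2, List.range_succ, List.map_append]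
      congr 1
      simp only [List.map_cons, List.map_nil, List.filter_cons, List.filter_nil]
      rw [if_pos (by simp; omega)]
      have : (1:ℤ) + 1 * (n:ℤ) = 1 + 2 * (((n + 1) / 2 : ℕ) : ℤ) := by push_cast; omega
      rw [this]
    · have h2 : (n + 1 + 1) / 2 = (n + 1) / 2 := by omega
      rw [h2]
      simp only [List.map_cons, List.map_nil, List.filter_cons, List.filter_nil]
      rw [if_neg (by simp; omega)]
      simp

theorem pvRange2_eq (m : Int) :
    PySem.List.pyRange 1 m 2 = (PySem.List.pyRange 1 m 1).filter (fun i => decide (i % 2 = 1)) := by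
  rw [PySem.List.pyRange_of_pos 1 m (by omega : (0:ℤ) < 2),
      PySem.List.pyRange_of_pos 1 m (by omega : (0:ℤ) < 1)]
  by_cases h : 1 < m
  · rw [if_pos h, if_pos h]
    have e1 : ((m - 1 + 1 - 1) / 1).toNat = (m - 1).toNat := by omega
    have e2 : ((m - 1 + 2 - 1) / 2).toNat = ((m - 1).toNat + 1) / 2 := by omega
    rw [e1, e2, ← pvRangeOdd (m - 1).toNat]
  · rw [if_neg h, if_neg h]
    simp

-- ===== VERDICT (by name: the statement is the Claim_ definition above) =====
theorem f_spec : Claim_equal_f := by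
  intro m _
  unfold Spec_f
  rw [f, f_alt, pvFA_body, pvFB_body, PySem.List.foldl_add, PySem.List.foldl_add]
  rw [pvRange2_eq]
  have hmem : ∀ i ∈ PySem.List.pyRange 1 m 1, 1 ≤ i := by
    intro i hi
    exact (PySem.List.mem_pyRange_one.mp hi).1
  have hfil : (((PySem.List.pyRange 1 m 1).filter (fun i => decide (i % 2 = 1))).map pvFA).sum
      = ((PySem.List.pyRange 1 m 1).map pvFA).sum := by
    apply pvSumFilter
    intro i hil hpi
    have h1 : 1 ≤ i := hmem i hil
    have h0 : i % 2 = 0 := by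
      simp only [decide_eq_false_iff_not] at hpi
      omega
    exact pvFA_even i h1 h0
  rw [← hfil,
    List.map_congr_left (fun i hil => pvFA_eq_FB i (hmem i (List.mem_of_mem_filter hil)))]
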